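-- pv_equiv track=rewrite | github.com/Mgobeaalcoba/python_fundamentals | Programación 1 - Verano 2021/Ejercicio 2 TP 3.py | crearmatriza
-- ===== SOURCE A (Python) =====
-- def crearmatriza(filas,columnas):
--     matriz=[]
--     for f in range(filas):
--         matriz.append([0]*columnas)
--     ins=1
--     for f in range(filas):
--         for c in range(columnas):
--             if f == c:
--                 matriz[f][c]=ins
--                 ins += 2
--     return matriz
-- ===== SOURCE B (Python) =====
-- def crearmatriza(filas, columnas):
--     return [[1 + 2 * c if f == c else 0 for c in range(columnas)]
--             for f in range(filas)]
-- ===== Notes on version B (the rewrite author's own statement) =====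
-- stated objective: simpler
-- what changed: Builds each row directly in one pass with the closed-form diagonal value 1+2*c, removing the separate zero-fill pass, the in-place mutation and the running 'ins' accumulator.
import Mathlib
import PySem

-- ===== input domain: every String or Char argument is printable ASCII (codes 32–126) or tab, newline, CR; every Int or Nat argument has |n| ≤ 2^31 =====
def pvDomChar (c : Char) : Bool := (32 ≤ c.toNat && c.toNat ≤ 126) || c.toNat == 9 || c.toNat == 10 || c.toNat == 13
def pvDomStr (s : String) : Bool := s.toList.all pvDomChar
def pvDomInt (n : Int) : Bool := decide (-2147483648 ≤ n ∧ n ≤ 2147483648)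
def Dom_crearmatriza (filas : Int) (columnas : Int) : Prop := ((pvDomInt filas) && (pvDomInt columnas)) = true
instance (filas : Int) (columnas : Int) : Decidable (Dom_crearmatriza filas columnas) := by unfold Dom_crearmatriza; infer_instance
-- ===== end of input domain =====

-- B builds each row in one pass with the closed-form diagonal value 1+2*c instead of
-- zero-filling the matrix and overwriting the diagonal with a running accumulator (objective: simpler).

-- ===== PORT A =====
-- matriz=[] ; for f in range(filas): matriz.append([0]*columnas)
-- ins=1 ; for f: for c: if f==c: matriz[f][c]=ins ; ins+=2 ; return matriz
def crearmatriza (filas : Int) (columnas : Int) : List (List Int) :=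
  ((PySem.List.pyRange 0 filas 1).foldl
      (fun s f =>
        (PySem.List.pyRange 0 columnas 1).foldl
          (fun s c =>
            if f == c then
              (s.1.modify f.toNat (fun row => row.set c.toNat s.2), s.2 + 2)
            else s) s)
      ((PySem.List.pyRange 0 filas 1).foldl
        (fun m _ => m ++ [List.replicate columnas.toNat 0]) [], 1)).1

-- ===== PORT B =====
-- [[1 + 2*c if f == c else 0 for c in range(columnas)] for f in range(filas)]
def crearmatriza_alt (filas : Int) (columnas : Int) : List (List Int) :=
  (PySem.List.pyRange 0 filas 1).map (fun f =>
    (PySem.List.pyRange 0 columnas 1).map (fun c =>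
      if f == c then 1 + 2 * c else 0))

-- ===== PRECONDITION & SPEC =====
def Spec_crearmatriza (filas : Int) (columnas : Int) (out : List (List Int)) : Prop := out = crearmatriza_alt filas columnas
instance (filas : Int) (columnas : Int) (out : List (List Int)) : Decidable (Spec_crearmatriza filas columnas out) := by unfold Spec_crearmatriza; infer_instance

-- ===== CLAIM (what is proved, stated in full; the proofs are below) =====
def Claim_equal_crearmatriza : Prop := ∀ (filas : Int) (columnas : Int), Dom_crearmatriza filas columnas → Spec_crearmatriza filas columnas (crearmatriza filas columnas)

-- ===== LEMMAS AND PROOFS =====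

-- the target row for row index f (what B computes), over Nat indices
def pvRowB (C : Nat) (f : Nat) : List Int :=
  (List.range C).map (fun c => if f = c then 1 + 2 * (c : Int) else 0)

theorem pvRowB_of_ge (C f : Nat) (h : C ≤ f) :
    pvRowB C f = List.replicate C 0 := by
  unfold pvRowB
  rw [List.map_congr_left (fun c hc => ?_), List.map_const', List.length_range]
  have : c < C := List.mem_range.mp hc
  simp only [if_neg (by omega : ¬ f = c)]

theorem pvRowB_of_lt (C f : Nat) (_h : f < C) :
    pvRowB C f = (List.replicate C 0).set f (1 + 2 * (f : Int)) := by
  unfold pvRowB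
  apply List.ext_getElem (by simp)
  intro i h1 h2
  simp only [List.length_map, List.length_range] at h1
  rcases eq_or_ne f i with rfl | hne
  · simp
  · simp only [List.getElem_map, List.getElem_range, List.getElem_set]
    rw [if_neg hne, if_neg hne, List.getElem_replicate]

-- the zero-fill loop builds replicate-length zero rows
theorem pvZeroFill {α : Type} (l : List α) (acc : List (List Int)) (C : Nat) :
    l.foldl (fun m _ => m ++ [List.replicate C 0]) acc
      = acc ++ List.replicate l.length (List.replicate C 0) := by
  induction l generalizing acc with
  | nil => simp
  | cons x xs ih => simp [List.foldl_cons, ih, List.replicate_succ]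

-- the inner loop over c: only c = f can fire
theorem pvInner (C : Nat) (f : Nat) (s : List (List Int) × Int) :
    ((List.range C).map (Int.ofNat)).foldl
      (fun s c =>
        if (f : Int) == c then
          (s.1.modify f (fun row => row.set c.toNat s.2), s.2 + 2)
        else s) s
    = if f < C then (s.1.modify f (fun row => row.set f s.2), s.2 + 2) else s := by
  induction C generalizing s with
  | zero => simp
  | succ C ih =>
    rw [List.range_succ, List.map_append, List.foldl_append, ih]
    rcases Nat.lt_trichotomy f C with h | h | h
    · simp only [if_pos h, if_pos (Nat.lt_succ_of_lt h)]
      simp only [List.map_cons, List.map_nil, List.foldl_cons, List.foldl_nil]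
      rw [if_neg (by simp only [Int.ofNat_eq_natCast, beq_iff_eq, Int.natCast_inj]; omega)]
    · subst h
      simp only [if_neg (lt_irrefl f), if_pos (Nat.lt_succ_self f)]
      simp only [List.map_cons, List.map_nil, List.foldl_cons, List.foldl_nil]
      rw [if_pos (by simp only [Int.ofNat_eq_natCast, beq_iff_eq])]
      simp
    · rw [if_neg (by omega), if_neg (by omega)]
      simp only [List.map_cons, List.map_nil, List.foldl_cons, List.foldl_nil]
      rw [if_neg (by simp only [Int.ofNat_eq_natCast, beq_iff_eq, Int.natCast_inj]; omega)]

-- state of the outer loop after the first k rows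
theorem pvOuter (F C : Nat) (k : Nat) :
    ((List.range k).map (Int.ofNat)).foldl
      (fun s f =>
        ((List.range C).map (Int.ofNat)).foldl
          (fun s c =>
            if f == c then
              (s.1.modify f.toNat (fun row => row.set c.toNat s.2), s.2 + 2)
            else s) s)
      (List.replicate F (List.replicate C 0), 1)
    = ((List.range F).map (fun i => if i < k then pvRowB C i else List.replicate C 0),
       1 + 2 * (min k C : Int)) := by
  induction k with
  | zero =>
    rw [List.range_zero, List.map_nil, List.foldl_nil]
    refine Prod.ext ?_ (by simp)
    simp only
    rw [List.map_congr_left (fun i _ => if_neg (Nat.not_lt_zero i)), List.map_const',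
      List.length_range]
  | succ k ih =>
    rw [List.range_succ, List.map_append, List.foldl_append, ih]
    simp only [List.map_cons, List.map_nil, List.foldl_cons, List.foldl_nil]
    have := pvInner C k
      ((List.range F).map (fun i => if i < k then pvRowB C i else List.replicate C 0),
        1 + 2 * (min k C : Int))
    simp only [Int.ofNat_eq_natCast, Int.toNat_natCast] at this ⊢
    rw [this]
    by_cases hkC : k < C
    · rw [if_pos hkC]
      have hmin : min (k : Int) (C : Int) = (k : Int) := by omega
      have hmin' : min ((k : Int) + 1) (C : Int) = (k : Int) + 1 := by omega
      push_cast
      rw [hmin, hmin']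
      refine Prod.ext ?_ (by ring)
      simp only
      apply List.ext_getElem (by simp)
      intro i h1 h2
      simp only [List.length_map, List.length_range] at h1 h2
      rw [List.getElem_modify]
      simp only [List.getElem_map, List.getElem_range]
      by_cases hik : i = k
      · subst hik
        rw [if_pos rfl, if_neg (lt_irrefl i), if_pos (Nat.lt_succ_self i)]
        rw [pvRowB_of_lt C i hkC]
      · rw [if_neg (fun h' : k = i => hik h'.symm)]
        rcases Nat.lt_or_ge i k with h | h
        · rw [if_pos h, if_pos (Nat.lt_succ_of_lt h)]
        · rw [if_neg (by omega), if_neg (by omega)]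
    · rw [if_neg hkC]
      have hmin : min (k : Int) (C : Int) = (C : Int) := by omega
      have hmin' : min ((k : Int) + 1) (C : Int) = (C : Int) := by omega
      push_cast
      rw [hmin, hmin']
      refine Prod.ext ?_ rfl
      simp only
      apply List.map_congr_left
      intro i hi
      by_cases hik : i = k
      · subst hik
        rw [if_neg (lt_irrefl i), if_pos (Nat.lt_succ_self i),
          pvRowB_of_ge C i (by omega)]
      · rcases Nat.lt_or_ge i k with h | h
        · rw [if_pos h, if_pos (Nat.lt_succ_of_lt h)]
        · rw [if_neg (by omega), if_neg (by omega)]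

theorem pvRange_cast (n : Int) :
    PySem.List.pyRange 0 n 1 = (List.range n.toNat).map (Int.ofNat) := by
  rw [PySem.List.pyRange_one]
  simp

-- ===== VERDICT (by name: the statement is the Claim_ definition above) =====
theorem crearmatriza_spec : Claim_equal_crearmatriza := by
  intro filas columnas _
  unfold Spec_crearmatriza crearmatriza crearmatriza_alt
  rw [pvRange_cast, pvRange_cast]
  rw [pvZeroFill, List.nil_append, List.length_map, List.length_range]
  rw [pvOuter filas.toNat columnas.toNat filas.toNat]
  simp only
  apply List.ext_getElem (by simp)
  intro i h1 h2
  simp only [List.length_map, List.length_range] at h1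
  simp only [List.getElem_map, List.getElem_range]
  rw [if_pos h1]
  unfold pvRowB
  rw [List.map_map]
  apply List.map_congr_left
  intro c hc
  simp only [Function.comp_apply, Int.ofNat_eq_natCast, beq_iff_eq, Int.natCast_inj]
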